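-- pv_equiv track=rewrite | github.com/younsuyoung12/baccarat-ai-engine | train_ml_model.py | _count_flips_last6
-- ===== SOURCE A (Python) =====
-- from typing import Any, Dict, List, Optional, Tuple
--
-- def _norm_pb(x: Any) -> str:
--     s = str(x).strip().upper()
--     if s in ("P", "PLAYER"):
--         return "P"
--     if s in ("B", "BANKER"):
--         return "B"
--     return ""
--
-- def _pb_clean(seq: List[str]) -> List[str]:
--     out: List[str] = []
--     for x in seq:
--         s = _norm_pb(x)
--         if s in ("P", "B"):
--             out.append(s)
--     return out
--
-- def _count_flips_last6(seq: List[str]) -> int: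
--     """
--     최근 6판 기준 P↔B 전환 횟수.
--     """
--     s = _pb_clean(seq)
--     tail = s[-6:] if len(s) >= 6 else s[:]
--     if len(tail) < 2:
--         return 0
--     flips = 0
--     for i in range(1, len(tail)):
--         if tail[i] != tail[i - 1]:
--             flips += 1
--     return int(flips)
-- ===== SOURCE B (Python) =====
-- def _count_flips_last6(seq):
--     # Collect the last (up to) 6 valid P/B tokens by scanning from the end,
--     # stopping early once 6 are found; flip count is invariant under reversal,
--     # so count adjacent differences directly on the reversed buffer.
--     buf = []
--     for x in reversed(seq):
--         s = str(x).strip().upper()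
--         if s in ("P", "PLAYER"):
--             buf.append("P")
--         elif s in ("B", "BANKER"):
--             buf.append("B")
--         else:
--             continue
--         if len(buf) == 6:
--             break
--     flips = 0
--     for i in range(1, len(buf)):
--         if buf[i] != buf[i - 1]:
--             flips += 1
--     return flips
-- ===== Notes on version B (the rewrite author's own statement) =====
-- stated objective: alternative
-- what changed: B scans seq from the end collecting at most 6 valid P/B tokens with an early break (no full cleaned list, no slice), and counts adjacent differences on the reversed buffer using reversal-invariance of the flip count.
import Mathlib
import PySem

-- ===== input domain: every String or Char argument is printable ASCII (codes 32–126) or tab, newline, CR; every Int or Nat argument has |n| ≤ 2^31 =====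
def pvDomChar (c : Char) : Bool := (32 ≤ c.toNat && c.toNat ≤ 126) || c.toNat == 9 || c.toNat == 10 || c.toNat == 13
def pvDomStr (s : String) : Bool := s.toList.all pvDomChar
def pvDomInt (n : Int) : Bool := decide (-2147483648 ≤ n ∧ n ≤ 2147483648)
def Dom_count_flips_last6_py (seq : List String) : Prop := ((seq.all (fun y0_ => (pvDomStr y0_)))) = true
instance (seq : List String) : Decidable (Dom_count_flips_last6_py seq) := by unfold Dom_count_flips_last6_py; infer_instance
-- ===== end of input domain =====

-- B scans seq from the end collecting at most 6 valid P/B tokens with an early break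
-- (no full cleaned list, no slice) and counts adjacent differences on the reversed
-- buffer, using that the flip count is invariant under reversal (alternative decomposition).

-- ===== PORT A =====
-- _norm_pb (str(x) on a str is the identity)
def normPb (x : String) : String :=
  let s := PySem.Str.upper (PySem.Str.strip x)
  if s = "P" ∨ s = "PLAYER" then "P"
  else if s = "B" ∨ s = "BANKER" then "B"
  else ""

-- _pb_clean
def pbClean (seq : List String) : List String :=
  seq.foldl (fun out x =>
    let s := normPb x
    if s = "P" ∨ s = "B" then out ++ [s] else out) []

-- the 'for i in range(1, len(tail))' flip loop: compares tail[i] with tail[i-1]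
def flipsA : List String → Int
  | a :: b :: rest => (if b ≠ a then 1 else 0) + flipsA (b :: rest)
  | _ => 0

def count_flips_last6_py (seq : List String) : Int :=
  let s := pbClean seq
  let tail := if s.length ≥ 6 then PySem.List.slice s (some (-6)) none else s
  if tail.length < 2 then 0 else flipsA tail

-- ===== PORT B =====
-- B's inline normalization: some "P" / some "B" for a valid token, none otherwise
def normPbAlt (x : String) : Option String :=
  let s := PySem.Str.upper (PySem.Str.strip x)
  if s = "P" ∨ s = "PLAYER" then some "P"
  else if s = "B" ∨ s = "BANKER" then some "B"
  else none

-- the 'for x in reversed(seq)' loop with the len==6 break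
def collectB : List String → List String → List String
  | [], buf => buf
  | x :: rest, buf =>
    match normPbAlt x with
    | some t =>
      let buf' := buf ++ [t]
      if buf'.length = 6 then buf' else collectB rest buf'
    | none => collectB rest buf

def flipsB : List String → Int
  | a :: b :: rest => (if b ≠ a then 1 else 0) + flipsB (b :: rest)
  | _ => 0

def count_flips_last6_py_alt (seq : List String) : Int :=
  let buf := collectB seq.reverse []
  flipsB buf

-- ===== PRECONDITION & SPEC =====
def Spec_count_flips_last6_py (seq : List String) (out : Int) : Prop := out = count_flips_last6_py_alt seq
instance (seq : List String) (out : Int) : Decidable (Spec_count_flips_last6_py seq out) := by unfold Spec_count_flips_last6_py; infer_instance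

-- ===== CLAIM (what is proved, stated in full; the proofs are below) =====
def Claim_equal_count_flips_last6_py : Prop := ∀ (seq : List String), Dom_count_flips_last6_py seq → Spec_count_flips_last6_py seq (count_flips_last6_py seq)

-- ===== LEMMAS AND PROOFS =====

-- A's clean step appends exactly what normPbAlt yields
theorem clean_step (out : List String) (x : String) :
    (let s := normPb x; if s = "P" ∨ s = "B" then out ++ [s] else out)
      = out ++ (normPbAlt x).toList := by
  unfold normPb normPbAlt
  dsimp only
  split_ifs <;> simp_all

theorem pbClean_foldl (seq : List String) (acc : List String) :
    seq.foldl (fun out x =>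
      let s := normPb x
      if s = "P" ∨ s = "B" then out ++ [s] else out) acc
      = acc ++ seq.filterMap normPbAlt := by
  induction seq generalizing acc with
  | nil => simp
  | cons x rest ih =>
    simp only [List.foldl_cons, List.filterMap_cons]
    rw [clean_step, ih]
    cases normPbAlt x <;> simp

theorem pbClean_eq (seq : List String) :
    pbClean seq = seq.filterMap normPbAlt := by
  unfold pbClean; simpa using pbClean_foldl seq []

-- B's early-breaking collector takes the first 6 valid tokens
theorem collectB_eq (l : List String) (buf : List String) (h : buf.length < 6) :
    collectB l buf = (buf ++ l.filterMap normPbAlt).take 6 := by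
  induction l generalizing buf with
  | nil => simp [collectB, List.take_of_length_le (Nat.le_of_lt h)]
  | cons x rest ih =>
    simp only [collectB, List.filterMap_cons]
    cases hx : normPbAlt x with
    | none => exact ih buf h
    | some t =>
      simp only
      by_cases h6 : (buf ++ [t]).length = 6
      · rw [if_pos h6]
        rw [show buf ++ (t :: rest.filterMap normPbAlt) = (buf ++ [t]) ++ rest.filterMap normPbAlt by simp]
        rw [List.take_append_of_le_length (by omega), List.take_of_length_le (by omega)]
      · rw [if_neg h6, ih (buf ++ [t]) (by simp at h6 ⊢; omega)]
        simp

def lastTerm (m : List String) (a : String) : Int :=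
  match m.getLast? with
  | none => 0
  | some b => if a ≠ b then 1 else 0

theorem flipsB_concat (m : List String) (a : String) :
    flipsB (m ++ [a]) = flipsB m + lastTerm m a := by
  induction m with
  | nil => simp [flipsB, lastTerm]
  | cons c t ih =>
    cases t with
    | nil => simp [flipsB, lastTerm]
    | cons d t' =>
      have hlt : lastTerm (c :: d :: t') a = lastTerm (d :: t') a := by
        simp [lastTerm, List.getLast?_cons_cons]
      rw [hlt]
      simp only [List.cons_append, flipsB] at ih ⊢
      rw [ih]
      ring

theorem flipsB_reverse (l : List String) : flipsB l.reverse = flipsB l := by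
  induction l with
  | nil => rfl
  | cons c t ih =>
    rw [List.reverse_cons, flipsB_concat, ih]
    cases t with
    | nil => simp [flipsB, lastTerm]
    | cons d t' =>
      simp only [flipsB, lastTerm, List.getLast?_reverse, List.head?_cons]
      by_cases h : c = d
      · simp [h]
      · have h2 : ¬ d = c := fun e => h e.symm
        rw [if_pos h2, if_pos h]
        ring

theorem flipsA_eq_flipsB (l : List String) : flipsA l = flipsB l := by
  induction l with
  | nil => rfl
  | cons a t ih =>
    cases t with
    | nil => rfl
    | cons b t' =>
      have ih' : flipsA (b :: t') = flipsB (b :: t') := ih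
      simp only [flipsA, flipsB] at *
      rw [ih']

theorem flipsB_short (l : List String) (h : l.length < 2) : flipsB l = 0 := by
  match l, h with
  | [], _ => rfl
  | [a], _ => rfl

-- ===== VERDICT (by name: the statement is the Claim_ definition above) =====
theorem count_flips_last6_py_spec : Claim_equal_count_flips_last6_py := by
  intro seq _
  unfold Spec_count_flips_last6_py count_flips_last6_py count_flips_last6_py_alt
  simp only
  set s := pbClean seq with hs
  -- B's buffer is the reversed last-6 of the cleaned list
  have hbuf : collectB seq.reverse [] = (s.reverse).take 6 := by
    rw [collectB_eq _ _ (by simp), hs, pbClean_eq]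
    simp [List.filterMap_reverse]
  -- A's tail is always drop (len - 6) of the cleaned list
  have htail : (if s.length ≥ 6 then PySem.List.slice s (some (-6)) none else s)
      = s.drop (s.length - 6) := by
    by_cases h6 : s.length ≥ 6
    · rw [if_pos h6, PySem.List.slice_from_neg_ofNat s 6 (by omega)]
    · rw [if_neg h6, Nat.sub_eq_zero_of_le (by omega), List.drop_zero]
  rw [htail, hbuf]
  have hrev : (s.reverse).take 6 = (s.drop (s.length - 6)).reverse := by
    rw [List.take_reverse]
  rw [hrev, flipsB_reverse]
  by_cases h2 : (s.drop (s.length - 6)).length < 2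
  · rw [if_pos h2, flipsB_short _ h2]
  · rw [if_neg h2, flipsA_eq_flipsB]
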